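-- pv_equiv track=rewrite | github.com/WillChing01/Pingu | tuning/parse_data.py | fenToSparse
-- ===== SOURCE A (Python) =====
-- def fenToSparse(fen):
--     """Return non-zero indices of input matrix derived from FEN."""
--
--     fen = fen.split(' ')[0]
--     indices = []
--
--     square = 56
--     pieceTypes = "KkQqRrBbNnPp"
--
--     for i in range(len(fen)):
--         if fen[i] == '/':
--             square -= 16
--         elif fen[i].isdigit():
--             square += int(fen[i])
--         else:
--             indices.append(64*pieceTypes.find(fen[i]) + square)
--             square += 1
--
--     return indices
-- ===== SOURCE B (Python) =====
-- def fenToSparse(fen):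
--     """Return non-zero indices of input matrix derived from FEN."""
--     board = fen.split(' ')[0]
--     pieceTypes = "KkQqRrBbNnPp"
--     # stage 1: how far each character advances the square counter
--     deltas = [-16 if c == '/' else int(c) if c.isdigit() else 1 for c in board]
--     # stage 2: exclusive prefix sums = the square at each character
--     squares = []
--     s = 56
--     for d in deltas:
--         squares.append(s)
--         s += d
--     # stage 3: emit an index for every piece character
--     return [64 * pieceTypes.find(c) + sq
--             for c, sq in zip(board, squares)
--             if c != '/' and not c.isdigit()]
-- ===== Notes on version B (the rewrite author's own statement) =====
-- stated objective: alternative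
-- what changed: B replaces A's single fold that threads a mutable square counter and appends as it scans by a staged pipeline: map each character to a square delta, turn the deltas into per-character squares with an exclusive prefix scan, then emit the indices with one filtered zip comprehension.
import Mathlib
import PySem

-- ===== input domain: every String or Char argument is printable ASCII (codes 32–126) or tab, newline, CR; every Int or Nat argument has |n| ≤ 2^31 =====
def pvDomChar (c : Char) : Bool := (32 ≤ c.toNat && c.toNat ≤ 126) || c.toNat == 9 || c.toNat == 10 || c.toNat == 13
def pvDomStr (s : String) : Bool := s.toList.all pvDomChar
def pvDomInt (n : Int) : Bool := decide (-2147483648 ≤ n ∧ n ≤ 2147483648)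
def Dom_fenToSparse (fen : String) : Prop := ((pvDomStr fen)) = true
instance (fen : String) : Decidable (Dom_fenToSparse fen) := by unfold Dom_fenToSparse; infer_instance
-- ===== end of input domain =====

-- B restages A's single accumulator fold as a three-stage pipeline (per-character deltas,
-- exclusive prefix scan of squares, filtered zip emitting the indices); objective: alternative.

-- ===== PORT A =====
def pvPieceTypes : List Char := "KkQqRrBbNnPp".toList

-- the flat loop 'for i in range(len(fen)): …' of A, as structural recursion over the chars
def pvLoopA : List Char → Int → List Int → List Int
  | [], _, indices => indices
  | c :: rest, square, indices =>
    if c = '/' then pvLoopA rest (square - 16) indices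
    else if PySem.Chars.isdigit c then
      pvLoopA rest (square + (PySem.Int.ofChars? [c]).getD 0) indices
    else
      pvLoopA rest (square + 1) (indices ++ [64 * PySem.Chars.find pvPieceTypes [c] + square])

def fenToSparse (fen : String) : List Int :=
  -- fen = fen.split(' ')[0]  ([0] never raises: split with a separator returns a nonempty list)
  let fen0 := ((PySem.List.pyGet? ((PySem.Str.split? fen " ").getD []) 0).getD "")
  pvLoopA fen0.toList 56 []

-- ===== PORT B =====
-- stage 1: -16 if c == '/' else int(c) if c.isdigit() else 1
def pvDelta (c : Char) : Int :=
  if c = '/' then -16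
  else if PySem.Chars.isdigit c then (PySem.Int.ofChars? [c]).getD 0
  else 1

-- stage 2: the exclusive prefix-scan loop 'for d in deltas: squares.append(s); s += d'
def pvScanB : Int → List Int → List Int
  | _, [] => []
  | s, d :: ds => s :: pvScanB (s + d) ds

def fenToSparse_alt (fen : String) : List Int :=
  let board := ((PySem.List.pyGet? ((PySem.Str.split? fen " ").getD []) 0).getD "")
  let deltas := board.toList.map pvDelta
  let squares := pvScanB 56 deltas
  -- stage 3: the filtered comprehension over zip(board, squares)
  (board.toList.zip squares).filterMap (fun p =>
    if p.1 = '/' ∨ PySem.Chars.isdigit p.1 then none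
    else some (64 * PySem.Chars.find pvPieceTypes [p.1] + p.2))

-- ===== PRECONDITION & SPEC =====
def Spec_fenToSparse (fen : String) (out : List Int) : Prop := out = fenToSparse_alt fen
instance (fen : String) (out : List Int) : Decidable (Spec_fenToSparse fen out) := by unfold Spec_fenToSparse; infer_instance

-- ===== CLAIM =====
def Claim_equal_fenToSparse : Prop := ∀ (fen : String), Dom_fenToSparse fen → Spec_fenToSparse fen (fenToSparse fen)

-- ===== LEMMAS AND PROOFS =====

-- A's fold equals B's pipeline from any starting square and accumulator
theorem pvMain (cs : List Char) : ∀ (s : Int) (acc : List Int),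
    pvLoopA cs s acc
      = acc ++ (cs.zip (pvScanB s (cs.map pvDelta))).filterMap (fun p =>
          if p.1 = '/' ∨ PySem.Chars.isdigit p.1 then none
          else some (64 * PySem.Chars.find pvPieceTypes [p.1] + p.2)) := by
  induction cs with
  | nil => intro s acc; simp [pvLoopA, pvScanB]
  | cons c rest ih =>
    intro s acc
    by_cases h : c = '/'
    · subst h
      simp only [pvLoopA, if_pos rfl, List.map, pvDelta, pvScanB, List.zip_cons_cons,
        List.filterMap_cons]
      simpa using ih (s - 16) acc
    · by_cases hd : PySem.Chars.isdigit c
      · simp only [pvLoopA, if_neg h, if_pos hd, List.map, pvDelta, if_neg h, if_pos hd,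
          pvScanB, List.zip_cons_cons, List.filterMap_cons, h, hd]
        simpa using ih (s + (PySem.Int.ofChars? [c]).getD 0) acc
      · simp only [pvLoopA, if_neg h, if_neg hd, List.map, pvDelta, if_neg h, if_neg hd,
          pvScanB, List.zip_cons_cons, List.filterMap_cons, h, hd]
        rw [ih (s + 1) (acc ++ [64 * PySem.Chars.find pvPieceTypes [c] + s])]
        simp [h]

-- ===== VERDICT =====
theorem fenToSparse_spec : Claim_equal_fenToSparse := by
  intro fen _
  unfold Spec_fenToSparse fenToSparse fenToSparse_alt
  simpa using pvMain _ 56 []
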